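-- pv_equiv track=rewrite | github.com/jaseer1984-ai/RECONCILATION | app.py | _auto_pick_other
-- ===== SOURCE A (Python) =====
-- def _casefold(s: str) -> str: return s.strip().lower()
--
-- def _eq(a: str, b: str) -> bool: return _casefold(a) == _casefold(b)
--
-- BR_ALIASES      = {"branch book", "branch", "br", "branchbook", "branch_book"}
--
-- def _auto_pick_other(our_name, names):
--     for n in names:
--         if not _eq(n, our_name) and _casefold(n) in BR_ALIASES:
--             return n
--     for n in names:
--         if not _eq(n, our_name):
--             return n
--     return None
-- ===== SOURCE B (Python) =====
-- BR_ALIASES = {"branch book", "branch", "br", "branchbook", "branch_book"}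
--
-- def _casefold(s: str) -> str:
--     return s.strip().lower()
--
-- def _eq(a: str, b: str) -> bool:
--     return _casefold(a) == _casefold(b)
--
-- def _auto_pick_other(our_name, names):
--     # single pass: return an alias immediately, remember the first non-matching name
--     fallback = None
--     for n in names:
--         if not _eq(n, our_name):
--             if _casefold(n) in BR_ALIASES:
--                 return n
--             if fallback is None:
--                 fallback = n
--     return fallback
-- ===== Notes on version B (the rewrite author's own statement) =====
-- stated objective: simpler
-- what changed: The two sequential scans over names are merged into one pass that returns an alias immediately and keeps the first non-matching name as a fallback.
import Mathlib
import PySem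

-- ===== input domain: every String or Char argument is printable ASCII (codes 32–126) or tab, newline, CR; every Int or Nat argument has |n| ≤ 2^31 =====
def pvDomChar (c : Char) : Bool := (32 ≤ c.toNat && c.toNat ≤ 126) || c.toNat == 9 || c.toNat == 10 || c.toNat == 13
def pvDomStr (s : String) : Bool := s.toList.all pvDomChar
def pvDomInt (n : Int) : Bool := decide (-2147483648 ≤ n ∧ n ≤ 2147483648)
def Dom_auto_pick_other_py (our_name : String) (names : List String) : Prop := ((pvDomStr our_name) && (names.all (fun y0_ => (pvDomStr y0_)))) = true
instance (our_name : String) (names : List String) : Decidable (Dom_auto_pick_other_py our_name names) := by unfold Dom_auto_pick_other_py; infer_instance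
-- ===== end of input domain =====

-- B merges A's two sequential scans into one pass with a fallback variable; objective: simpler.

-- ===== PORT A =====
def pvCasefold (s : String) : String := PySem.Str.lower (PySem.Str.strip s)

def pvEq (a b : String) : Bool := pvCasefold a == pvCasefold b

def BR_ALIASES : PySem.Set String :=
  PySem.Set.ofList ["branch book", "branch", "br", "branchbook", "branch_book"]

-- first loop of A: first name that is not _eq to our_name and whose casefold is an alias
def pvLoop1 (our_name : String) : List String → Option String
  | [] => none
  | n :: rest =>
    if !pvEq n our_name && BR_ALIASES.contains (pvCasefold n) then some n
    else pvLoop1 our_name rest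

-- second loop of A: first name that is not _eq to our_name
def pvLoop2 (our_name : String) : List String → Option String
  | [] => none
  | n :: rest =>
    if !pvEq n our_name then some n else pvLoop2 our_name rest

def auto_pick_other_py (our_name : String) (names : List String) : Option String :=
  match pvLoop1 our_name names with
  | some n => some n
  | none => pvLoop2 our_name names

-- ===== PORT B =====
-- single pass with a fallback accumulator (B's loop)
def pvGo (our_name : String) : List String → Option String → Option String
  | [], fallback => fallback
  | n :: rest, fallback =>
    if !pvEq n our_name then
      if BR_ALIASES.contains (pvCasefold n) then some n
      else pvGo our_name rest (if fallback.isNone then some n else fallback)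
    else pvGo our_name rest fallback

def auto_pick_other_py_alt (our_name : String) (names : List String) : Option String :=
  pvGo our_name names none

-- ===== PRECONDITION & SPEC =====
def Spec_auto_pick_other_py (our_name : String) (names : List String) (out : Option String) : Prop := out = auto_pick_other_py_alt our_name names
instance (our_name : String) (names : List String) (out : Option String) : Decidable (Spec_auto_pick_other_py our_name names out) := by unfold Spec_auto_pick_other_py; infer_instance

-- ===== CLAIM (what is proved, stated in full; the proofs are below) =====
def Claim_equal_auto_pick_other_py : Prop := ∀ (our_name : String) (names : List String), Dom_auto_pick_other_py our_name names → Spec_auto_pick_other_py our_name names (auto_pick_other_py our_name names)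

-- ===== LEMMAS AND PROOFS =====
theorem pvGo_eq (our_name : String) (names : List String) (fb : Option String) :
    pvGo our_name names fb =
      match pvLoop1 our_name names with
      | some n => some n
      | none => match fb with
                | some x => some x
                | none => pvLoop2 our_name names := by
  induction names generalizing fb with
  | nil => cases fb <;> simp [pvGo, pvLoop1, pvLoop2]
  | cons n rest ih =>
    by_cases he : pvEq n our_name
    · simp [pvGo, pvLoop1, pvLoop2, he, ih]
    · by_cases ha : pvCasefold n ∈ BR_ALIASES
      · simp [pvGo, pvLoop1, he, ha]
      · cases fb <;> simp [pvGo, pvLoop1, pvLoop2, he, ha, ih]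

-- ===== VERDICT (by name: the statement is the Claim_ definition above) =====
theorem auto_pick_other_py_spec : Claim_equal_auto_pick_other_py := by
  intro our_name names _
  unfold Spec_auto_pick_other_py auto_pick_other_py auto_pick_other_py_alt
  rw [pvGo_eq]
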